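-- pv_equiv track=rewrite | github.com/TheZappie/cython_trials | juffen.py | fillbook
-- ===== SOURCE A (Python) =====
-- def juf(n, params):
--     for i in params:
--         if n % i == 0:
--             return True
--     for i in params:
--         if str(i) in str(n):
--             return True
--     return False
--
-- def fillbook(n, params):
--     '''
--     Returns a size n dictionary, in which value is False if key is juf.
--     '''
--     book = []
--     for i in range(n + 1):
--         if juf(i, params):
--             book.append(False)
--         else:
--             book.append(True)
--     return book
-- ===== SOURCE B (Python) =====
-- def fillbook(n, params):
--     # Sieve: mark all multiples of each (nonzero) param in one pass per param,
--     # then a single substring pass; instead of per-number trial division.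
--     marked = set()
--     for p in params:
--         if p != 0:
--             marked.update(range(0, n + 1, abs(p)))
--     texts = [str(p) for p in params]
--     return [i not in marked and not any(t in str(i) for t in texts)
--             for i in range(n + 1)]
-- ===== Notes on version B (the rewrite author's own statement) =====
-- stated objective: alternative
-- what changed: Replaces per-number trial division (juf loops over params for every i) by a sieve: one marking pass over the multiples of each param collected in a set, followed by a single substring pass over 0..n.
import Mathlib
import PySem

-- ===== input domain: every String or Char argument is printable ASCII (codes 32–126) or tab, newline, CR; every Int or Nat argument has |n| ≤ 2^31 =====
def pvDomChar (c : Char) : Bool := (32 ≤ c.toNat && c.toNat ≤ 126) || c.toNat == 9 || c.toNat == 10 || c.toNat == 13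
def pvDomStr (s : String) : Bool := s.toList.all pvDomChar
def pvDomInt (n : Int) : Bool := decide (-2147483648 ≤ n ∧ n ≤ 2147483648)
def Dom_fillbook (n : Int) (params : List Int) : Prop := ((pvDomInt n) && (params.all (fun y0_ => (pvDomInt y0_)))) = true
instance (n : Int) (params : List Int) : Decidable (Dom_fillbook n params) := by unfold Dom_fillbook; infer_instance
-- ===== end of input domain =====

-- B replaces A's per-number trial division by a one-pass-per-param multiples sieve
-- (a set of marked indices) plus a single substring pass; an alternative algorithm, not claimed faster.


-- ===== PORT A =====
-- juf: two early-return loops over params (divisibility, then substring).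
def jufA (nn : Int) (params : List Int) : Bool :=
  if params.any (fun p => PySem.Int.mod nn p == 0) then true
  else if params.any (fun p => PySem.Str.isIn (PySem.Int.toStr p) (PySem.Int.toStr nn)) then true
  else false

def fillbook (n : Int) (params : List Int) : List Bool :=
  (PySem.List.pyRange 0 (n + 1) 1).foldl
    (fun book i => if jufA i params then book ++ [false] else book ++ [true]) []

-- ===== PORT B =====
def fillbook_alt (n : Int) (params : List Int) : List Bool :=
  let marked : PySem.Set Int :=
    params.foldl
      (fun s p => if p ≠ 0 then PySem.Set.update s (PySem.List.pyRange 0 (n + 1) (p.natAbs : Int)) else s)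
      PySem.Set.empty
  let texts := params.map PySem.Int.toStr
  (PySem.List.pyRange 0 (n + 1) 1).map
    (fun i => !(PySem.Set.contains marked i) &&
              !(texts.any (fun t => PySem.Str.isIn t (PySem.Int.toStr i))))

-- ===== PRECONDITION & SPEC =====
-- Pre_ admits exactly the inputs on which A returns: A raises ZeroDivisionError (juf computes
-- `i % 0`) precisely when n ≥ 0, 0 ∈ params, no ±1 precedes the first 0, and not (n = 0 with a
-- nonzero head), so those inputs (and only those) are excluded.
def Pre_fillbook (n : Int) (params : List Int) : Prop :=
  n < 0 ∨ (0 : Int) ∉ params ∨ (1 : Int) ∈ params.takeWhile (· ≠ 0) ∨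
    (-1 : Int) ∈ params.takeWhile (· ≠ 0) ∨ (n = 0 ∧ params.takeWhile (· ≠ 0) ≠ [])
instance (n : Int) (params : List Int) : Decidable (Pre_fillbook n params) := by
  unfold Pre_fillbook; infer_instance
def pvWitness_fillbook : Int × List Int := (5, [2, 7])

def Spec_fillbook (n : Int) (params : List Int) (out : List Bool) : Prop := out = fillbook_alt n params
instance (n : Int) (params : List Int) (out : List Bool) : Decidable (Spec_fillbook n params out) := by unfold Spec_fillbook; infer_instance

-- ===== CLAIM (what is proved, stated in full; the proofs are below) =====
def Claim_equal_fillbook : Prop := ∀ (n : Int) (params : List Int), Dom_fillbook n params → Pre_fillbook n params → Spec_fillbook n params (fillbook n params)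

-- ===== LEMMAS AND PROOFS =====

-- Membership in the sieve accumulator built by B's first pass.
theorem mark_fold_mem (n : Int) (params : List Int) (s : PySem.Set Int) (i : Int) :
    i ∈ params.foldl
      (fun s p => if p ≠ 0 then PySem.Set.update s (PySem.List.pyRange 0 (n + 1) (p.natAbs : Int)) else s) s
    ↔ i ∈ s ∨ ∃ p ∈ params, p ≠ 0 ∧ i ∈ PySem.List.pyRange 0 (n + 1) (p.natAbs : Int) := by
  induction params generalizing s with
  | nil => simp
  | cons q qs ih =>
      simp only [List.foldl_cons]
      by_cases hq : q = 0
      · rw [if_neg (by simp [hq]), ih]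
        simp only [List.mem_cons]
        constructor
        · rintro (h | ⟨p, hp, h0, hm⟩)
          · exact Or.inl h
          · exact Or.inr ⟨p, Or.inr hp, h0, hm⟩
        · rintro (h | ⟨p, (rfl | hp), h0, hm⟩)
          · exact Or.inl h
          · exact absurd hq h0
          · exact Or.inr ⟨p, hp, h0, hm⟩
      · rw [if_pos hq, ih]
        simp only [PySem.Set.mem_update, List.mem_cons]
        constructor
        · rintro (⟨h | h⟩ | ⟨p, hp, h0, hm⟩)
          · exact Or.inl h
          · exact Or.inr ⟨q, Or.inl rfl, hq, h⟩
          · exact Or.inr ⟨p, Or.inr hp, h0, hm⟩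
        · rintro (h | ⟨p, (rfl | hp), h0, hm⟩)
          · exact Or.inl (Or.inl h)
          · exact Or.inl (Or.inr hm)
          · exact Or.inr ⟨p, hp, h0, hm⟩

-- The per-index agreement of the two programs, for i in 0..n with no zero param.
theorem entry_eq (n : Int) (params : List Int) (h0 : (0 : Int) ∉ params)
    (i : Int) (hi0 : 0 ≤ i) (hin : i < n + 1) :
    (if jufA i params then false else true)
      = (!(PySem.Set.contains
            (params.foldl
              (fun s p => if p ≠ 0 then PySem.Set.update s (PySem.List.pyRange 0 (n + 1) (p.natAbs : Int)) else s)
              PySem.Set.empty) i) &&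
         !((params.map PySem.Int.toStr).any (fun t => PySem.Str.isIn t (PySem.Int.toStr i)))) := by
  have hdiv : params.any (fun p => PySem.Int.mod i p == 0)
      = PySem.Set.contains
          (params.foldl
            (fun s p => if p ≠ 0 then PySem.Set.update s (PySem.List.pyRange 0 (n + 1) (p.natAbs : Int)) else s)
            PySem.Set.empty) i := by
    rcases hc : PySem.Set.contains _ i with _ | _
    · -- contains = false: no param marks i
      rw [List.any_eq_false]
      intro p hp
      simp only [beq_iff_eq, PySem.Int.mod_eq_zero_iff_dvd]
      intro hdvd
      have hp0 : p ≠ 0 := fun h => h0 (h ▸ hp)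
      have : i ∈ (params.foldl
          (fun s p => if p ≠ 0 then PySem.Set.update s (PySem.List.pyRange 0 (n + 1) (p.natAbs : Int)) else s)
          PySem.Set.empty) := by
        rw [mark_fold_mem]
        refine Or.inr ⟨p, hp, hp0, ?_⟩
        rw [PySem.List.mem_pyRange_iff_of_pos (by exact_mod_cast Int.natAbs_pos.mpr hp0)]
        exact ⟨hi0, hin, by simpa using (Int.natAbs_dvd.mpr hdvd)⟩
      rw [← PySem.Set.contains_iff, hc] at this
      exact Bool.false_ne_true this
    · -- contains = true: some param marks i
      have := (PySem.Set.contains_iff _ _).mp hc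
      rw [mark_fold_mem] at this
      rcases this with h | ⟨p, hp, hp0, hm⟩
      · simp [PySem.Set.empty] at h
      · rw [List.any_eq_true]
        refine ⟨p, hp, ?_⟩
        rw [PySem.List.mem_pyRange_iff_of_pos (by exact_mod_cast Int.natAbs_pos.mpr hp0)] at hm
        simp only [beq_iff_eq, PySem.Int.mod_eq_zero_iff_dvd]
        exact Int.natAbs_dvd.mp (by simpa using hm.2.2)
  have hsub : (params.map PySem.Int.toStr).any (fun t => PySem.Str.isIn t (PySem.Int.toStr i))
      = params.any (fun p => PySem.Str.isIn (PySem.Int.toStr p) (PySem.Int.toStr i)) := by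
    rw [List.any_map]; rfl
  unfold jufA
  rw [hdiv, hsub]
  cases hC : PySem.Set.contains
      (params.foldl
        (fun s p => if p ≠ 0 then PySem.Set.update s (PySem.List.pyRange 0 (n + 1) (p.natAbs : Int)) else s)
        PySem.Set.empty) i <;>
    cases hS : params.any (fun p => PySem.Str.isIn (PySem.Int.toStr p) (PySem.Int.toStr i)) <;>
    rfl

-- When some nonzero param divides i, both programs give entry false.
theorem entry_all_false (n : Int) (params : List Int) (i : Int)
    (hp : ∃ p ∈ params, p ≠ 0 ∧ p ∣ i) (hi0 : 0 ≤ i) (hin : i < n + 1) :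
    (if jufA i params then false else true)
      = (!(PySem.Set.contains
            (params.foldl
              (fun s p => if p ≠ 0 then PySem.Set.update s (PySem.List.pyRange 0 (n + 1) (p.natAbs : Int)) else s)
              PySem.Set.empty) i) &&
         !((params.map PySem.Int.toStr).any (fun t => PySem.Str.isIn t (PySem.Int.toStr i)))) := by
  obtain ⟨p, hpm, hp0, hdvd⟩ := hp
  have h1 : params.any (fun p => PySem.Int.mod i p == 0) = true :=
    List.any_eq_true.mpr ⟨p, hpm, by simp [PySem.Int.mod_eq_zero_iff_dvd, hdvd]⟩
  have h2 : PySem.Set.contains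
      (params.foldl
        (fun s p => if p ≠ 0 then PySem.Set.update s (PySem.List.pyRange 0 (n + 1) (p.natAbs : Int)) else s)
        PySem.Set.empty) i = true := by
    apply (PySem.Set.contains_iff _ _).mpr
    rw [mark_fold_mem]
    refine Or.inr ⟨p, hpm, hp0, ?_⟩
    rw [PySem.List.mem_pyRange_iff_of_pos (by exact_mod_cast Int.natAbs_pos.mpr hp0)]
    exact ⟨hi0, hin, by simpa using Int.natAbs_dvd.mpr hdvd⟩
  unfold jufA
  rw [h1, h2]
  rfl

-- ===== VERDICT (by name: the statement is the Claim_ definition above) =====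
theorem fillbook_spec : Claim_equal_fillbook := by
  intro n params _ hpre
  unfold Spec_fillbook fillbook fillbook_alt
  have hfun : (fun (book : List Bool) (i : Int) => if jufA i params then book ++ [false] else book ++ [true])
      = fun book i => book ++ [if jufA i params then false else true] := by
    funext b i; split_ifs <;> rfl
  rw [hfun, PySem.List.foldl_append_singleton_eq_map]
  simp only [List.nil_append]
  apply List.map_congr_left
  intro i hi
  rw [PySem.List.mem_pyRange_one] at hi
  rcases hpre with h | h | h | h | ⟨hn0, hne⟩
  · omega
  · exact entry_eq n params h i hi.1 hi.2
  · exact entry_all_false n params i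
      ⟨1, (List.takeWhile_sublist _).mem h, one_ne_zero, one_dvd i⟩ hi.1 hi.2
  · exact entry_all_false n params i
      ⟨-1, (List.takeWhile_sublist _).mem h, by norm_num, ⟨-i, by ring⟩⟩ hi.1 hi.2
  · have hi0 : i = 0 := by omega
    have hmem := List.head_mem hne
    refine entry_all_false n params i
      ⟨(params.takeWhile (· ≠ 0)).head hne, (List.takeWhile_sublist _).mem hmem, ?_, by rw [hi0]; exact dvd_zero _⟩
      hi.1 hi.2
    have := List.mem_takeWhile_imp hmem
    simpa using this
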